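-- pv_equiv track=rewrite | github.com/sudo-tee/opencode.nvim | scripts/dependency-topology/graph_utils.py | back_edges
-- ===== SOURCE A (Python) =====
-- from collections import Counter, defaultdict
-- from typing import Dict, Iterable, List, Optional, Sequence, Set, Tuple
--
-- def back_edges(nodes: Iterable[str], edges: Iterable[Tuple[str, str]]) -> Set[Tuple[str, str]]:
--     graph: Dict[str, List[str]] = defaultdict(list)
--     for a, b in edges:
--         graph[a].append(b)
--     for n in graph:
--         graph[n] = sorted(set(graph[n]))
--
--     white, gray, black = 0, 1, 2
--     color: Dict[str, int] = {n: white for n in set(nodes)}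
--     backs: Set[Tuple[str, str]] = set()
--
--     def dfs(v: str) -> None:
--         color[v] = gray
--         for w in graph[v]:
--             c = color.get(w, white)
--             if c == white:
--                 dfs(w)
--             elif c == gray:
--                 backs.add((v, w))
--         color[v] = black
--
--     for n in sorted(color.keys()):
--         if color[n] == white:
--             dfs(n)
--
--     return backs
-- ===== SOURCE B (Python) =====
-- from collections import defaultdict
--
--
-- def back_edges(nodes, edges):
--     graph = defaultdict(list)
--     for a, b in edges:
--         graph[a].append(b)
--     for n in graph:
--         graph[n] = sorted(set(graph[n]))
--
--     color = {n: 0 for n in set(nodes)}  # 0 white, 1 gray, 2 black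
--     backs = set()
--
--     for n in sorted(color):
--         if color[n] == 0:
--             color[n] = 1
--             stack = [(n, graph[n])]
--             while stack:
--                 v, ws = stack[-1]
--                 if not ws:
--                     color[v] = 2
--                     stack.pop()
--                 else:
--                     w = ws[0]
--                     stack[-1] = (v, ws[1:])
--                     c = color.get(w, 0)
--                     if c == 0:
--                         color[w] = 1
--                         stack.append((w, graph[w]))
--                     elif c == 1:
--                         backs.add((v, w))
--     return backs
-- ===== Notes on version B (the rewrite author's own statement) =====
-- stated objective: alternative
-- what changed: The recursive dfs (white/gray/black colouring) is replaced by an iterative DFS driving an explicit stack of (node, remaining-neighbours) frames inside a while loop, visiting nodes and recording back edges in exactly the same order without Python recursion.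
import Mathlib
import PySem

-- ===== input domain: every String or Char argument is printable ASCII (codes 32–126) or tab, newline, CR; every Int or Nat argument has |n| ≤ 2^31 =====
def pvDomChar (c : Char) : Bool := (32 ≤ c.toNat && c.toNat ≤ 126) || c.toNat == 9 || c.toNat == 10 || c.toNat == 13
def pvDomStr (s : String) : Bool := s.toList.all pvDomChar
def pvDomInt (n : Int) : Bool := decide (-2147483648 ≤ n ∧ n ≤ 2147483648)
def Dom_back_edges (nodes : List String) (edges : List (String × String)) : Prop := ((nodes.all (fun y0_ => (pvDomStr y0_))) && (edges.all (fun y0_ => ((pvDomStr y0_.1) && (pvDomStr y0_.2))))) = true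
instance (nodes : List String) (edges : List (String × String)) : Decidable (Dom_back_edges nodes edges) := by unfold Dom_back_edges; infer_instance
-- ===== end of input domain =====

-- B replaces A's recursive DFS with an explicit stack of (node, remaining-neighbours) frames
-- (same graph/colour set-up, same visit order); objective: alternative (no recursion), same output.
-- Both Pythons return a set; the ports return its elements in insertion order.

-- ===== PORT A =====
-- shared by both ports: Source A and Source B build graph and colour map with identical code.
-- graph = defaultdict(list); for a,b in edges: graph[a].append(b); for n in graph: graph[n] = sorted(set(graph[n]))
def pvBuildGraph (edges : List (String × String)) : PySem.Dict String (List String) :=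
  let g := edges.foldl (fun g e => g.insert e.1 (g.getD e.1 [] ++ [e.2])) PySem.Dict.empty
  g.keys.foldl (fun g' n => g'.insert n (PySem.List.sorted (PySem.Set.ofList (g'.getD n [])) (fun x => x) false)) g

-- color = {n: 0 for n in set(nodes)}  (only looked up / sorted afterwards, so set order is immaterial)
def pvInitColor (nodes : List String) : PySem.Dict String Int :=
  (PySem.Set.ofList nodes).foldl (fun d n => d.insert n (0 : Int)) PySem.Dict.empty

mutual
-- def dfs(v): color[v]=gray; for w in graph[v]: …; color[v]=black   (fuel = totality guard, never
-- exhausted when fuel exceeds the number of white nodes; one unit is consumed per recursive call)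
def pvDfsA (g : PySem.Dict String (List String)) (f : Nat) (v : String)
    (s : PySem.Dict String Int × List (String × String)) :
    PySem.Dict String Int × List (String × String) :=
  let s1 := (s.1.insert v 1, s.2)
  let s2 := pvDfsGoA g f v (g.getD v []) s1
  (s2.1.insert v 2, s2.2)
termination_by (f, (g.getD v []).length + 2)

-- the body of dfs's "for w in graph[v]" loop
def pvDfsGoA (g : PySem.Dict String (List String)) (f : Nat) (v : String) (ws : List String)
    (s : PySem.Dict String Int × List (String × String)) :
    PySem.Dict String Int × List (String × String) :=
  match ws with
  | [] => s
  | w :: ws' =>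
    let c := s.1.getD w 0
    if c = 0 then
      match f with
      | 0 => s          -- fuel guard (unreachable with the fuel back_edges supplies)
      | Nat.succ f' => pvDfsGoA g (f' + 1) v ws' (pvDfsA g f' w s)
    else if c = 1 then pvDfsGoA g f v ws' (s.1, PySem.Set.add s.2 (v, w))
    else pvDfsGoA g f v ws' s
termination_by (f, ws.length + 1)
end

def back_edges (nodes : List String) (edges : List (String × String)) : List (String × String) :=
  let g := pvBuildGraph edges
  let color0 := pvInitColor nodes
  let fuel := nodes.length + edges.length + 1
  let s := (PySem.List.sorted color0.keys (fun x => x) false).foldl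
      (fun s n => if s.1.getD n 0 = 0 then pvDfsA g fuel n s else s)
      (color0, ([] : List (String × String)))
  s.2

-- ===== PORT B =====
-- helper for the termination measure of the stack loop
def pvStackWeight (st : List (String × List String)) : Nat :=
  st.foldr (fun p a => p.2.length + 1 + a) 0

-- the "while stack:" loop of Source B over frames (v, remaining neighbours); fuel is consumed only
-- when a white node is pushed (totality guard, never exhausted with the fuel supplied below)
def pvRunB (g : PySem.Dict String (List String)) (f : Nat) (st : List (String × List String))
    (s : PySem.Dict String Int × List (String × String)) :
    PySem.Dict String Int × List (String × String) :=
  match st with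
  | [] => s
  | (v, []) :: rest => pvRunB g f rest (s.1.insert v 2, s.2)
  | (v, w :: ws) :: rest =>
    let c := s.1.getD w 0
    if c = 0 then
      match f with
      | 0 => s          -- fuel guard (unreachable with the fuel back_edges_alt supplies)
      | Nat.succ f' => pvRunB g f' ((w, g.getD w []) :: (v, ws) :: rest) (s.1.insert w 1, s.2)
    else if c = 1 then pvRunB g f ((v, ws) :: rest) (s.1, PySem.Set.add s.2 (v, w))
    else pvRunB g f ((v, ws) :: rest) s
termination_by (f, pvStackWeight st)
decreasing_by all_goals first
  | exact Prod.Lex.left _ _ (by omega)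
  | (simp only [pvStackWeight, List.foldr_cons, List.length_cons]; exact Prod.Lex.right _ (by omega))

def back_edges_alt (nodes : List String) (edges : List (String × String)) : List (String × String) :=
  let g := pvBuildGraph edges
  let color0 := pvInitColor nodes
  let fuel := nodes.length + edges.length + 1
  let s := (PySem.List.sorted color0.keys (fun x => x) false).foldl
      (fun s n =>
        if s.1.getD n 0 = 0 then pvRunB g fuel [(n, g.getD n [])] (s.1.insert n 1, s.2) else s)
      (color0, ([] : List (String × String)))
  s.2

-- ===== PRECONDITION & SPEC =====
def Spec_back_edges (nodes : List String) (edges : List (String × String)) (out : List (String × String)) : Prop := out = back_edges_alt nodes edges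
instance (nodes : List String) (edges : List (String × String)) (out : List (String × String)) : Decidable (Spec_back_edges nodes edges out) := by unfold Spec_back_edges; infer_instance

-- ===== CLAIM (what is proved, stated in full; the proofs are below) =====
def Claim_equal_back_edges : Prop := ∀ (nodes : List String) (edges : List (String × String)), Dom_back_edges nodes edges → Spec_back_edges nodes edges (back_edges nodes edges)

-- ===== LEMMAS AND PROOFS =====

-- number of white entries of the colour map over the node universe U
def pvWc (U : List String) (c : PySem.Dict String Int) : Nat :=
  U.countP (fun u => c.getD u 0 == 0)

-- "c' has no more whites than c" (pointwise)
def pvWle (c c' : PySem.Dict String Int) : Prop :=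
  ∀ u, c'.getD u 0 = 0 → c.getD u 0 = 0

lemma pvWle_refl (c : PySem.Dict String Int) : pvWle c c := fun _ h => h

lemma pvWle_trans {c₁ c₂ c₃ : PySem.Dict String Int} (h₁ : pvWle c₁ c₂) (h₂ : pvWle c₂ c₃) :
    pvWle c₁ c₃ := fun u h => h₁ u (h₂ u h)

lemma pvWle_insert (c : PySem.Dict String Int) (v : String) {k : Int} (hk : k ≠ 0) :
    pvWle c (c.insert v k) := by
  intro u h
  rw [PySem.Dict.getD_insert] at h
  split at h
  · exact absurd h hk
  · exact h

lemma pvWc_mono (U : List String) {c c' : PySem.Dict String Int} (h : pvWle c c') :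
    pvWc U c' ≤ pvWc U c := by
  apply List.countP_mono_left
  intro u _ hu
  simpa using h u (by simpa using hu)

lemma pvWc_lt (U : List String) {c c' : PySem.Dict String Int} (h : pvWle c c')
    {w : String} (hw : w ∈ U) (hwhite : c.getD w 0 = 0) (hnw : c'.getD w 0 ≠ 0) :
    pvWc U c' < pvWc U c := by
  induction U with
  | nil => cases hw
  | cons u U ih =>
    simp only [pvWc, List.countP_cons] at *
    rcases List.mem_cons.mp hw with rfl | hw'
    · have hle := pvWc_mono U h
      simp only [pvWc] at hle
      simp [hwhite, hnw]
      omega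
    · have h1 : (if (c'.getD u 0 == 0) = true then 1 else 0) ≤
          (if (c.getD u 0 == 0) = true then 1 else 0) := by
        split_ifs with h2 h3
        · omega
        · exact absurd (h u (by simpa using h2)) (by simpa using h3)
        all_goals omega
      have := ih hw'
      omega

-- dfs only darkens colours
lemma pvDfsGoA_wle (g : PySem.Dict String (List String)) :
    ∀ (f : Nat) (v : String) (ws : List String) (s : PySem.Dict String Int × List (String × String)),
      pvWle s.1 (pvDfsGoA g f v ws s).1 := by
  intro f
  induction f using Nat.strong_induction_on with
  | _ f ih =>
    have hA : ∀ f' < f, ∀ (w : String) (s : PySem.Dict String Int × List (String × String)),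
        pvWle s.1 (pvDfsA g f' w s).1 := by
      intro f' hf' w s
      rw [pvDfsA]
      show pvWle s.1 ((pvDfsGoA g f' w (g.getD w []) (s.1.insert w 1, s.2)).1.insert w 2)
      refine pvWle_trans ?_ (pvWle_insert _ w (k := 2) (by norm_num))
      exact pvWle_trans (pvWle_insert s.1 w (k := 1) (by norm_num))
        (ih f' hf' w (g.getD w []) (s.1.insert w 1, s.2))
    intro v ws
    induction ws with
    | nil => intro s; rw [pvDfsGoA.eq_def]; exact pvWle_refl _
    | cons w ws' ihw =>
      intro s
      rw [pvDfsGoA.eq_def]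
      simp only []
      split_ifs with h0 h1
      · match f with
        | 0 => exact pvWle_refl _
        | Nat.succ f' =>
          exact pvWle_trans (hA f' (Nat.lt_succ_self _) w s) (ihw _)
      · exact ihw _
      · exact ihw _

lemma pvDfsA_wle (g : PySem.Dict String (List String)) (f : Nat) (v : String)
    (s : PySem.Dict String Int × List (String × String)) :
    pvWle s.1 (pvDfsA g f v s).1 := by
  rw [pvDfsA]
  show pvWle s.1 ((pvDfsGoA g f v (g.getD v []) (s.1.insert v 1, s.2)).1.insert v 2)
  refine pvWle_trans ?_ (pvWle_insert _ v (k := 2) (by norm_num))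
  exact pvWle_trans (pvWle_insert s.1 v (k := 1) (by norm_num))
    (pvDfsGoA_wle g f v (g.getD v []) (s.1.insert v 1, s.2))

lemma pvDfsA_black (g : PySem.Dict String (List String)) (f : Nat) (v : String)
    (s : PySem.Dict String Int × List (String × String)) :
    (pvDfsA g f v s).1.getD v 0 = 2 := by
  rw [pvDfsA]
  simp [PySem.Dict.getD_insert_self]

lemma pvDfsA_wc_lt (U : List String) (g : PySem.Dict String (List String)) (f : Nat) {v : String}
    (s : PySem.Dict String Int × List (String × String))
    (hv : v ∈ U) (hwhite : s.1.getD v 0 = 0) :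
    pvWc U (pvDfsA g f v s).1 < pvWc U s.1 := by
  refine pvWc_lt U (pvDfsA_wle g f v s) hv hwhite ?_
  rw [pvDfsA_black]
  norm_num

lemma pvWc_pos (U : List String) {c : PySem.Dict String Int} {w : String}
    (hw : w ∈ U) (hwhite : c.getD w 0 = 0) : 0 < pvWc U c := by
  rw [pvWc, List.countP_pos_iff]
  exact ⟨w, hw, by simp [hwhite]⟩

lemma pvWc_gray_lt (U : List String) {c : PySem.Dict String Int} {w : String}
    (hw : w ∈ U) (hwhite : c.getD w 0 = 0) : pvWc U (c.insert w 1) < pvWc U c := by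
  refine pvWc_lt U (pvWle_insert c w (k := 1) (by norm_num)) hw hwhite ?_
  simp [PySem.Dict.getD_insert_self]

-- fuel irrelevance for the loop body of the recursive dfs
lemma pvDfsGoA_fuel (U : List String) (g : PySem.Dict String (List String))
    (hg : ∀ x y, y ∈ g.getD x [] → y ∈ U) :
    ∀ (f f' : Nat) (v : String) (ws : List String)
      (s : PySem.Dict String Int × List (String × String)),
      pvWc U s.1 < f → f ≤ f' → (∀ w ∈ ws, w ∈ U) →
      pvDfsGoA g f v ws s = pvDfsGoA g f' v ws s := by
  intro f
  induction f using Nat.strong_induction_on with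
  | _ f ih =>
    intro f' v ws
    induction ws generalizing f' with
    | nil => intro s _ _ _; rw [pvDfsGoA.eq_def, pvDfsGoA.eq_def]
    | cons w ws' ihw =>
      intro s hwc hff hU
      have hwU : w ∈ U := hU w (List.mem_cons_self)
      have hU' : ∀ u ∈ ws', u ∈ U := fun u hu => hU u (List.mem_cons_of_mem _ hu)
      conv_lhs => rw [pvDfsGoA.eq_def]
      conv_rhs => rw [pvDfsGoA.eq_def]
      simp only []
      split_ifs with h0 h1
      · -- w is white
        have hpos : 0 < pvWc U s.1 := pvWc_pos U hwU h0
        match f, f', hwc, hff with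
        | Nat.succ fa, Nat.succ fb, hwc, hff =>
          have hab : fa ≤ fb := Nat.succ_le_succ_iff.mp hff
          have hgray : pvWc U (s.1.insert w 1) < fa := by
            have := pvWc_gray_lt U hwU h0
            omega
          have hAeq : pvDfsA g fa w s = pvDfsA g fb w s := by
            rw [pvDfsA, pvDfsA]
            have := ih fa (Nat.lt_succ_self _) fb w (g.getD w [])
              ((s.1.insert w 1, s.2)) hgray hab (fun y hy => hg w y hy)
            rw [this]
          dsimp only
          rw [hAeq]
          have hX : pvWc U (pvDfsA g fb w s).1 < Nat.succ fa := by
            have h1 := pvDfsA_wc_lt U g fb (v := w) s hwU h0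
            omega
          exact ihw (Nat.succ fb) (pvDfsA g fb w s) hX hff hU'
      · exact ihw f' (s.1, PySem.Set.add s.2 (v, w)) hwc hff hU'
      · exact ihw f' s hwc hff hU'

-- fuel irrelevance for the recursive dfs
lemma pvDfsA_fuel (U : List String) (g : PySem.Dict String (List String))
    (hg : ∀ x y, y ∈ g.getD x [] → y ∈ U) :
    ∀ (f f' : Nat) (v : String) (s : PySem.Dict String Int × List (String × String)),
      v ∈ U → s.1.getD v 0 = 0 → pvWc U s.1 ≤ f → f ≤ f' →
      pvDfsA g f v s = pvDfsA g f' v s := by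
  intro f f' v s hv hwhite hwc hff
  rw [pvDfsA, pvDfsA]
  have hgray : pvWc U (s.1.insert v 1) < f := by
    have := pvWc_gray_lt U hv hwhite
    omega
  rw [pvDfsGoA_fuel U g hg f f' v (g.getD v []) (s.1.insert v 1, s.2) hgray hff
    (fun y hy => hg v y hy)]

-- fuel irrelevance for the stack machine
lemma pvRunB_fuel (U : List String) (g : PySem.Dict String (List String))
    (hg : ∀ x y, y ∈ g.getD x [] → y ∈ U) :
    ∀ (f f' : Nat) (st : List (String × List String))
      (s : PySem.Dict String Int × List (String × String)),
      pvWc U s.1 < f → f ≤ f' → (∀ p ∈ st, ∀ w ∈ p.2, w ∈ U) →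
      pvRunB g f st s = pvRunB g f' st s := by
  intro f
  induction f using Nat.strong_induction_on with
  | _ f ih =>
    suffices h : ∀ (n : Nat) (st : List (String × List String)), pvStackWeight st ≤ n →
        ∀ (f' : Nat) (s : PySem.Dict String Int × List (String × String)),
          pvWc U s.1 < f → f ≤ f' → (∀ p ∈ st, ∀ w ∈ p.2, w ∈ U) →
          pvRunB g f st s = pvRunB g f' st s by
      intro f' st s h1 h2 h3
      exact h (pvStackWeight st) st le_rfl f' s h1 h2 h3
    intro n
    induction n with
    | zero =>
      intro st hw f' s _ _ _
      match st with
      | [] => rw [pvRunB.eq_def, pvRunB.eq_def]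
      | p :: rest => exfalso; simp [pvStackWeight] at hw
    | succ n ihn =>
      intro st hw f' s hwc hff hok
      match st with
      | [] => rw [pvRunB.eq_def, pvRunB.eq_def]
      | (v, []) :: rest =>
        conv_lhs => rw [pvRunB.eq_def]
        conv_rhs => rw [pvRunB.eq_def]
        dsimp only
        refine ihn rest ?_ f' (s.1.insert v 2, s.2) ?_ hff
          (fun p hp => hok p (List.mem_cons_of_mem _ hp))
        · simp [pvStackWeight] at hw ⊢; omega
        · dsimp only
          have := pvWc_mono U (pvWle_insert s.1 v (k := 2) (by norm_num))
          omega
      | (v, w :: ws') :: rest =>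
        have hwU : w ∈ U := hok (v, w :: ws') (List.mem_cons_self) w (List.mem_cons_self)
        conv_lhs => rw [pvRunB.eq_def]
        conv_rhs => rw [pvRunB.eq_def]
        dsimp only
        split_ifs with h0 h1
        · -- w is white
          have hpos : 0 < pvWc U s.1 := pvWc_pos U hwU h0
          match f, f', hwc, hff with
          | Nat.succ fa, Nat.succ fb, hwc, hff =>
            dsimp only
            have hgray : pvWc U (s.1.insert w 1) < fa := by
              have := pvWc_gray_lt U hwU h0
              omega
            refine ih fa (Nat.lt_succ_self _) fb _ (s.1.insert w 1, s.2) hgray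
              (Nat.succ_le_succ_iff.mp hff) ?_
            intro p hp
            rcases List.mem_cons.mp hp with rfl | hp'
            · exact fun y hy => hg w y hy
            rcases List.mem_cons.mp hp' with rfl | hp''
            · exact fun y hy => hok (v, w :: ws') (List.mem_cons_self) y (List.mem_cons_of_mem _ hy)
            · exact hok p (List.mem_cons_of_mem _ hp'')
        · -- w is gray
          refine ihn ((v, ws') :: rest) ?_ f' (s.1, PySem.Set.add s.2 (v, w)) hwc hff ?_
          · simp [pvStackWeight] at hw ⊢; omega
          · intro p hp
            rcases List.mem_cons.mp hp with rfl | hp'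
            · exact fun y hy => hok (v, w :: ws') (List.mem_cons_self) y (List.mem_cons_of_mem _ hy)
            · exact hok p (List.mem_cons_of_mem _ hp')
        · -- w is black
          refine ihn ((v, ws') :: rest) ?_ f' s hwc hff ?_
          · simp [pvStackWeight] at hw ⊢; omega
          · intro p hp
            rcases List.mem_cons.mp hp with rfl | hp'
            · exact fun y hy => hok (v, w :: ws') (List.mem_cons_self) y (List.mem_cons_of_mem _ hy)
            · exact hok p (List.mem_cons_of_mem _ hp')

-- the bridge: one stack frame of B computes exactly one dfs-loop of A
lemma pvBridge (U : List String) (g : PySem.Dict String (List String))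
    (hg : ∀ x y, y ∈ g.getD x [] → y ∈ U) :
    ∀ (f : Nat) (ws : List String) (f' : Nat) (v : String)
      (rest : List (String × List String)) (s : PySem.Dict String Int × List (String × String)),
      pvWc U s.1 < f → pvWc U s.1 < f' →
      (∀ w ∈ ws, w ∈ U) → (∀ p ∈ rest, ∀ w ∈ p.2, w ∈ U) →
      pvRunB g f ((v, ws) :: rest) s =
        pvRunB g f' rest ((pvDfsGoA g f' v ws s).1.insert v 2, (pvDfsGoA g f' v ws s).2) := by
  intro f
  induction f using Nat.strong_induction_on with
  | _ f ih =>
    intro ws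
    induction ws with
    | nil =>
      intro f' v rest s hwc hwc' _ hok
      conv_lhs => rw [pvRunB.eq_def]
      rw [pvDfsGoA.eq_def]
      dsimp only
      have hb : pvWc U (s.1.insert v 2) < f ∧ pvWc U (s.1.insert v 2) < f' := by
        have := pvWc_mono U (pvWle_insert s.1 v (k := 2) (by norm_num))
        omega
      rcases Nat.le_total f f' with hle | hle
      · exact pvRunB_fuel U g hg f f' rest (s.1.insert v 2, s.2) hb.1 hle hok
      · exact (pvRunB_fuel U g hg f' f rest (s.1.insert v 2, s.2) hb.2 hle hok).symm
    | cons w ws' ihw =>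
      intro f' v rest s hwc hwc' hU hok
      have hwU : w ∈ U := hU w (List.mem_cons_self)
      have hU' : ∀ u ∈ ws', u ∈ U := fun u hu => hU u (List.mem_cons_of_mem _ hu)
      conv_lhs => rw [pvRunB.eq_def]
      conv_rhs => rw [pvDfsGoA.eq_def]
      dsimp only
      split_ifs with h0 h1
      · -- w is white: B pushes a frame, A recurses
        have hpos : 0 < pvWc U s.1 := pvWc_pos U hwU h0
        match f, f', hwc, hwc' with
        | Nat.succ fa, Nat.succ fb, hwc, hwc' =>
          dsimp only
          have hgray : pvWc U (s.1.insert w 1) < fa := by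
            have := pvWc_gray_lt U hwU h0
            omega
          have hrok : ∀ p ∈ (v, ws') :: rest, ∀ y ∈ p.2, y ∈ U := by
            intro p hp
            rcases List.mem_cons.mp hp with rfl | hp'
            · exact hU'
            · exact hok p hp'
          have step1 := ih fa (Nat.lt_succ_self _) (g.getD w []) fa w ((v, ws') :: rest)
            (s.1.insert w 1, s.2) hgray hgray (fun y hy => hg w y hy) hrok
          rw [step1]
          have hXA : ((pvDfsGoA g fa w (g.getD w []) (s.1.insert w 1, s.2)).1.insert w 2,
              (pvDfsGoA g fa w (g.getD w []) (s.1.insert w 1, s.2)).2) = pvDfsA g fa w s := by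
            rw [pvDfsA]
          rw [hXA]
          have hXwc : pvWc U (pvDfsA g fa w s).1 < fa := by
            have := pvDfsA_wc_lt U g fa (v := w) s hwU h0
            omega
          have hXwc' : pvWc U (pvDfsA g fa w s).1 < Nat.succ fb := by
            have := pvDfsA_wc_lt U g fa (v := w) s hwU h0
            omega
          have step2 := ih fa (Nat.lt_succ_self _) ws' (Nat.succ fb) v rest
            (pvDfsA g fa w s) hXwc hXwc' hU' hok
          rw [step2]
          have hAA : pvDfsA g fa w s = pvDfsA g fb w s := by
            rcases Nat.le_total fa fb with hle | hle
            · exact pvDfsA_fuel U g hg fa fb w s hwU h0 (by omega) hle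
            · exact (pvDfsA_fuel U g hg fb fa w s hwU h0 (by omega) hle).symm
          rw [hAA]
      · -- w is gray: both record the back edge
        exact ihw f' v rest (s.1, PySem.Set.add s.2 (v, w)) hwc hwc' hU' hok
      · -- w is black: both skip
        exact ihw f' v rest s hwc hwc' hU' hok

lemma pvFoldIns_sub (T : List String) :
    ∀ (l : List (String × String)) (d : PySem.Dict String (List String)),
      (∀ v w, w ∈ d.getD v [] → w ∈ T) → (∀ e ∈ l, e.2 ∈ T) →
      ∀ v w, w ∈ (l.foldl (fun g e => g.insert e.1 (g.getD e.1 [] ++ [e.2])) d).getD v [] →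
        w ∈ T := by
  intro l
  induction l with
  | nil => intro d hd _ v w hw; exact hd v w hw
  | cons e l ihl =>
    intro d hd hl v w hw
    refine ihl _ ?_ (fun e' he' => hl e' (List.mem_cons_of_mem _ he')) v w hw
    intro v' w' hw'
    rw [PySem.Dict.getD_insert] at hw'
    split at hw'
    · rcases List.mem_append.mp hw' with h | h
      · exact hd _ _ h
      · simp only [List.mem_singleton] at h
        exact h ▸ hl e (List.mem_cons_self)
    · exact hd _ _ hw'

lemma pvFoldSort_sub (T : List String) :
    ∀ (ks : List String) (d : PySem.Dict String (List String)),
      (∀ v w, w ∈ d.getD v [] → w ∈ T) →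
      ∀ v w, w ∈ (ks.foldl (fun g' n =>
          g'.insert n (PySem.List.sorted (PySem.Set.ofList (g'.getD n [])) (fun x => x) false))
          d).getD v [] → w ∈ T := by
  intro ks
  induction ks with
  | nil => intro d hd v w hw; exact hd v w hw
  | cons k ks ihk =>
    intro d hd v w hw
    refine ihk _ ?_ v w hw
    intro v' w' hw'
    rw [PySem.Dict.getD_insert] at hw'
    split at hw'
    · rw [PySem.List.mem_sorted, PySem.Set.mem_ofList] at hw'
      exact hd _ _ hw'
    · exact hd _ _ hw'

lemma pvBuildGraph_sub (edges : List (String × String)) :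
    ∀ v w, w ∈ (pvBuildGraph edges).getD v [] → w ∈ edges.map Prod.snd := by
  intro v w hw
  rw [pvBuildGraph] at hw
  refine pvFoldSort_sub _ _ _ (pvFoldIns_sub _ edges PySem.Dict.empty ?_ ?_) v w hw
  · intro v' w' hw'
    simp [PySem.Dict.getD_empty] at hw'
  · intro e he
    exact List.mem_map.mpr ⟨e, he, rfl⟩

-- ===== VERDICT (by name: the statement is the Claim_ definition above) =====
theorem back_edges_spec : Claim_equal_back_edges := by
  intro nodes edges _
  unfold Spec_back_edges back_edges back_edges_alt
  dsimp only
  congr 1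
  apply List.foldl_ext
  intro s n _
  dsimp only
  split_ifs with h0
  · -- n is white: one frame of the stack machine is one dfs call
    set U : List String := nodes ++ edges.map Prod.snd with hU
    set g := pvBuildGraph edges with hgdef
    have hg : ∀ x y, y ∈ g.getD x [] → y ∈ U :=
      fun x y hy => List.mem_append_right _ (pvBuildGraph_sub edges x y hy)
    have hwc : pvWc U (s.1.insert n 1) < nodes.length + edges.length + 1 := by
      have h1 : pvWc U (s.1.insert n 1) ≤ U.length := List.countP_le_length
      have h2 : U.length = nodes.length + edges.length := by simp [hU]
      omega
    have hb := pvBridge U g hg (nodes.length + edges.length + 1) (g.getD n [])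
      (nodes.length + edges.length + 1) n [] (s.1.insert n 1, s.2) hwc hwc
      (fun y hy => hg n y hy) (by intro p hp; cases hp)
    rw [hb, pvRunB.eq_def, pvDfsA]
  · rfl
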